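-- pv_equiv track=rewrite | github.com/ArinaArtiukevich/algorithms_practice | basic/firist_project/class/1_5_prefix/3_zero_sum.py | count_zero_sum_prefix_sum
-- ===== SOURCE A (Python) =====
-- from typing import List
--
-- def count_zero_sum_prefix_sum(nums: List[int]) -> List[int]:
--     sums = {0 : 1}
--     current_sum = 0
--     res = 0
--     for num in nums:
--         current_sum += num
--         if current_sum in sums.keys():
--             sums[current_sum] += 1
--         else:
--             sums[current_sum] = 1
--     for key in sums:
--         res = res + sums[key] if sums[key] > 1 else res
--     return res
-- ===== SOURCE B (Python) =====
-- from typing import List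
--
-- def count_zero_sum_prefix_sum(nums: List[int]) -> int:
--     # prefix sums, including the leading 0
--     prefix = [0]
--     total = 0
--     for num in nums:
--         total += num
--         prefix.append(total)
--     prefix.sort()
--     # scan the sorted list in runs of equal values; a run of length L > 1
--     # contributes L (all its occurrences are duplicated values)
--     res = 0
--     i = 0
--     n = len(prefix)
--     while i < n:
--         j = i + 1
--         while j < n and prefix[j] == prefix[i]:
--             j += 1
--         if j - i > 1:
--             res += j - i
--         i = j
--     return res
-- ===== Notes on version B (the rewrite author's own statement) =====
-- stated objective: alternative
-- what changed: Replaces the frequency dict plus key-iteration pass by building the list of prefix sums (with the leading 0), sorting it, and scanning it once in runs of equal values, adding each run length greater than 1.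
import Mathlib
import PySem

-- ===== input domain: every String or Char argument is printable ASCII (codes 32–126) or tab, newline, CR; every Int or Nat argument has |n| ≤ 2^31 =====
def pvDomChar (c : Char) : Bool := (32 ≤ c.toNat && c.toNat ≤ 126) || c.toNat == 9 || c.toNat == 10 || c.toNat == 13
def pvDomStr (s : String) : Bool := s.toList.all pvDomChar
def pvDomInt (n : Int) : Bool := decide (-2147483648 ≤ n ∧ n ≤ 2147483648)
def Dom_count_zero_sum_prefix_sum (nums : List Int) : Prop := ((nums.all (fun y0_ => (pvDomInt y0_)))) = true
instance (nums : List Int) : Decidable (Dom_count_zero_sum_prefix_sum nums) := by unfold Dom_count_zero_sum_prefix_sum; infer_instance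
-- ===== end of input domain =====

-- B replaces A's frequency dict and key pass by sort-then-run-scan over the prefix sums; alternative decomposition, same results.

-- ===== PORT A =====
-- one iteration of A's first loop: current_sum += num, then the if/else dict update
def pvStepA (p : PySem.Dict Int Int × Int) (num : Int) : PySem.Dict Int Int × Int :=
  let cs := p.2 + num
  if p.1.contains cs then (p.1.insert cs (p.1.getD cs 0 + 1), cs)
  else (p.1.insert cs 1, cs)

def count_zero_sum_prefix_sum (nums : List Int) : Int :=
  let st := nums.foldl pvStepA (PySem.Dict.ofList [((0 : Int), (1 : Int))], 0)
  st.1.keys.foldl (fun res key => if st.1.getD key 0 > 1 then res + st.1.getD key 0 else res) 0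

-- ===== PORT B =====
-- the inner 'advance j while prefix[j] == prefix[i]' loop is the takeWhile/dropWhile
-- split of the remaining list; the outer while-loop is the recursion on the rest
def pvRunCount : List Int → Int
  | [] => 0
  | x :: xs =>
      let t := xs.takeWhile (fun y => y == x)
      let rest := xs.dropWhile (fun y => y == x)
      (if (t.length : Int) + 1 > 1 then (t.length : Int) + 1 else 0) + pvRunCount rest
termination_by l => l.length
decreasing_by
  have := List.length_dropWhile_le (fun y => y == x) xs
  simp only [List.length_cons]
  omega

-- one iteration of B's building loop: total += num; prefix.append(total)
def pvStepB (p : List Int × Int) (num : Int) : List Int × Int :=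
  let total := p.2 + num
  (p.1 ++ [total], total)

def count_zero_sum_prefix_sum_alt (nums : List Int) : Int :=
  let built := nums.foldl pvStepB ([0], 0)
  pvRunCount (PySem.List.sorted built.1 (fun x => x) false)

-- ===== PRECONDITION & SPEC =====
def Spec_count_zero_sum_prefix_sum (nums : List Int) (out : Int) : Prop := out = count_zero_sum_prefix_sum_alt nums
instance (nums : List Int) (out : Int) : Decidable (Spec_count_zero_sum_prefix_sum nums out) := by unfold Spec_count_zero_sum_prefix_sum; infer_instance

-- ===== CLAIM (what is proved, stated in full; the proofs are below) =====
def Claim_equal_count_zero_sum_prefix_sum : Prop := ∀ (nums : List Int), Dom_count_zero_sum_prefix_sum nums → Spec_count_zero_sum_prefix_sum nums (count_zero_sum_prefix_sum nums)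

-- ===== LEMMAS AND PROOFS =====

-- the list of prefix sums of ns starting from running total c
def pvPsums : Int → List Int → List Int
  | _, [] => []
  | c, n :: ns => (c + n) :: pvPsums (c + n) ns

-- the contribution of a distinct value k: its multiplicity in P if duplicated, else 0
def pvG (P : List Int) (k : Int) : Int :=
  if (P.count k : Int) > 1 then (P.count k : Int) else 0

-- A's dict-update branch collapses to one insert
theorem pv_step_collapse (d : PySem.Dict Int Int) (c num : Int) :
    pvStepA (d, c) num = (d.insert (c + num) (d.getD (c + num) 0 + 1), c + num) := by
  unfold pvStepA
  by_cases h : d.contains (c + num)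
  · simp [h]
  · have h' : d.contains (c + num) = false := by simpa using h
    rw [if_neg (by simp [h']), PySem.Dict.getD_of_not_contains d 0 h']
    norm_num

-- A's accumulation loop over (dict, running-sum) pairs, characterised
theorem pv_loopA (ns : List Int) : ∀ (d : PySem.Dict Int Int) (c : Int),
    ns.foldl pvStepA (d, c)
    = ((pvPsums c ns).foldl (fun d x => d.insert x (d.getD x 0 + 1)) d, c + ns.sum) := by
  induction ns with
  | nil => intro d c; simp [pvPsums]
  | cons n ns ih =>
    intro d c
    rw [List.foldl_cons, pv_step_collapse, ih]
    simp only [pvPsums, List.foldl_cons, List.sum_cons, Prod.mk.injEq]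
    exact ⟨trivial, by ring⟩

-- B's prefix-list-building loop, characterised
theorem pv_loopB (ns : List Int) : ∀ (acc : List Int) (c : Int),
    ns.foldl pvStepB (acc, c) = (acc ++ pvPsums c ns, c + ns.sum) := by
  induction ns with
  | nil => intro acc c; simp [pvPsums]
  | cons n ns ih =>
    intro acc c
    rw [List.foldl_cons, show pvStepB (acc, c) n = (acc ++ [c + n], c + n) from rfl, ih]
    simp only [pvPsums, List.sum_cons, Prod.mk.injEq]
    exact ⟨by simp, by ring⟩

-- A's second loop is a sum of contributions
theorem pv_foldl_sum (l : List Int) (f : Int → Int) : ∀ (a : Int),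
    l.foldl (fun res k => if f k > 1 then res + f k else res) a
      = a + (l.map (fun k => if f k > 1 then f k else 0)).sum := by
  induction l with
  | nil => intro a; simp
  | cons x l ih =>
    intro a
    simp only [List.foldl_cons, List.map_cons, List.sum_cons]
    by_cases h : f x > 1
    · simp [h, ih]; ring
    · simp [h, ih]

-- A computes the sum of pvG over the distinct prefix sums
theorem pv_A_eq (nums : List Int) :
    count_zero_sum_prefix_sum nums
      = ((PySem.Set.ofList (0 :: pvPsums 0 nums)).map (pvG (0 :: pvPsums 0 nums))).sum := by
  unfold count_zero_sum_prefix_sum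
  rw [pv_loopA]
  have hinit : (PySem.Dict.ofList [((0 : Int), (1 : Int))])
      = PySem.Dict.empty.insert 0 (PySem.Dict.empty.getD 0 0 + 1) := by decide
  rw [hinit]
  have hctr : (pvPsums 0 nums).foldl (fun d x => d.insert x (d.getD x 0 + 1))
        (PySem.Dict.empty.insert 0 (PySem.Dict.empty.getD 0 0 + 1))
      = PySem.Dict.counter (0 :: pvPsums 0 nums) := by
    rw [← PySem.Dict.foldl_insert_getD_add_one_eq_counter]
    rfl
  rw [hctr, pv_foldl_sum]
  simp only [PySem.Dict.keys_counter, PySem.Dict.getD_counter, zero_add]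
  congr 1

-- the head of a dropWhile run fails the predicate
theorem pv_dropWhile_head_false {α : Type} (p : α → Bool) (l : List α) (h0 : α) (d' : List α)
    (h : l.dropWhile p = h0 :: d') : p h0 = false := by
  induction l with
  | nil => simp at h
  | cons a l ih =>
    rw [List.dropWhile_cons] at h
    by_cases hp : p a
    · exact ih (by rwa [if_pos hp] at h)
    · rw [if_neg hp] at h
      obtain ⟨h1, -⟩ := List.cons.inj h
      rw [← h1]
      simpa using hp

-- the run-scan over any ≤-sorted list is the same sum of contributions
theorem pv_run_eq : ∀ (n : Nat) (L : List Int), L.length ≤ n → L.Pairwise (· ≤ ·) →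
    pvRunCount L = ((PySem.Set.ofList L).map (pvG L)).sum := by
  intro n
  induction n with
  | zero =>
    intro L hlen _
    have : L = [] := List.length_eq_zero_iff.mp (Nat.le_zero.mp hlen)
    subst this
    simp [pvRunCount, PySem.Set.ofList]
  | succ n ih =>
    intro L hlen hpw
    cases L with
    | nil => simp [pvRunCount, PySem.Set.ofList]
    | cons x xs =>
      rw [pvRunCount]
      have ht : ∀ y ∈ xs.takeWhile (fun y => y == x), y = x := by
        intro y hy
        have := List.mem_takeWhile_imp (p := fun y => y == x) (l := xs) hy
        exact eq_of_beq this
      generalize hd : xs.dropWhile (fun y => y == x) = d at *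
      generalize htw : xs.takeWhile (fun y => y == x) = t at *
      have hsplit : t ++ d = xs := by rw [← htw, ← hd]; exact List.takeWhile_append_dropWhile
      have htx : ∀ y ∈ t, y = x := ht
      have hpwxs : xs.Pairwise (· ≤ ·) := (List.pairwise_cons.mp hpw).2
      have hdsub : d.Sublist xs := by rw [← hd]; exact List.dropWhile_sublist _
      have hdgt : ∀ y ∈ d, x < y := by
        intro y hy
        cases hdc : d with
        | nil => rw [hdc] at hy; cases hy
        | cons h0 d' =>
          have hh0 : (h0 == x) = false :=
            pv_dropWhile_head_false _ xs h0 d' (hd.trans hdc)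
          have hh0ne : h0 ≠ x := by simpa using hh0
          have hh0mem : h0 ∈ xs := hdsub.subset (by rw [hdc]; simp)
          have hxh0 : x ≤ h0 := (List.pairwise_cons.mp hpw).1 h0 hh0mem
          have hxlt : x < h0 := lt_of_le_of_ne hxh0 (Ne.symm hh0ne)
          rw [hdc] at hy
          rcases List.mem_cons.mp hy with rfl | hy'
          · exact hxlt
          · have hpwd : d.Pairwise (· ≤ ·) := List.Pairwise.sublist hdsub hpwxs
            rw [hdc] at hpwd
            exact lt_of_lt_of_le hxlt ((List.pairwise_cons.mp hpwd).1 y hy')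
      have hxnd : x ∉ d := fun h => lt_irrefl x (hdgt x h)
      -- count of x in the whole list is the run length
      have hcx : (x :: xs).count x = t.length + 1 := by
        rw [← hsplit]
        have h1 : t.count x = t.length := List.count_eq_length.mpr (fun b hb => (htx b hb).symm)
        have h2 : d.count x = 0 := List.count_eq_zero.mpr hxnd
        simp [List.count_append, h1, h2]
      -- counts of the remaining values are unchanged
      have hcd : ∀ y ∈ d, (x :: xs).count y = d.count y := by
        intro y hy
        have hyne : (x == y) = false := by
          simp only [beq_eq_false_iff_ne]
          exact fun h => lt_irrefl x (h ▸ hdgt y hy)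
        have hty : t.count y = 0 := List.count_eq_zero.mpr
          (fun hyt => lt_irrefl x ((htx y hyt) ▸ hdgt y hy))
        rw [← hsplit]
        simp [List.count_cons, List.count_append, hty, hyne]
      -- the distinct values of x :: xs are x together with those of d
      have hperm : (PySem.Set.ofList (x :: xs)).Perm (x :: PySem.Set.ofList d) := by
        rw [List.perm_ext_iff_of_nodup (PySem.Set.nodup_ofList _)
          (by simp [List.nodup_cons, PySem.Set.mem_ofList, hxnd, PySem.Set.nodup_ofList])]
        intro a
        simp only [PySem.Set.mem_ofList, List.mem_cons]
        constructor
        · rintro (rfl | ha)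
          · exact Or.inl rfl
          · rw [← hsplit] at ha
            rcases List.mem_append.mp ha with h | h
            · exact Or.inl (htx a h)
            · exact Or.inr h
        · rintro (rfl | ha)
          · exact Or.inl rfl
          · refine Or.inr ?_
            rw [← hsplit]
            exact List.mem_append.mpr (Or.inr ha)
      rw [(hperm.map (pvG (x :: xs))).sum_eq]
      simp only [List.map_cons, List.sum_cons]
      have hgx : pvG (x :: xs) x = (if (t.length : Int) + 1 > 1 then (t.length : Int) + 1 else 0) := by
        simp only [pvG, hcx]
        push_cast
        rfl
      have hmapcongr : (PySem.Set.ofList d).map (pvG (x :: xs)) = (PySem.Set.ofList d).map (pvG d) := by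
        apply List.map_congr_left
        intro k hk
        have hkd : k ∈ d := (PySem.Set.mem_ofList d k).mp hk
        simp [pvG, hcd k hkd]
      rw [hgx, hmapcongr]
      have hdlen : d.length ≤ n := by
        have h1 : d.length ≤ xs.length := hdsub.length_le
        have h2 : (x :: xs).length ≤ n + 1 := hlen
        simp only [List.length_cons] at h2
        omega
      rw [ih d hdlen (List.Pairwise.sublist hdsub hpwxs)]

-- pvG only depends on multiplicities, which permutations preserve
theorem pv_G_perm {L P : List Int} (h : L.Perm P) : pvG L = pvG P := by
  funext k
  simp [pvG, h.count_eq k]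

-- the contribution sum is permutation-invariant
theorem pv_sum_perm {L P : List Int} (h : L.Perm P) :
    ((PySem.Set.ofList L).map (pvG L)).sum = ((PySem.Set.ofList P).map (pvG P)).sum := by
  rw [pv_G_perm h]
  have hp : (PySem.Set.ofList L).Perm (PySem.Set.ofList P) := by
    rw [List.perm_ext_iff_of_nodup (PySem.Set.nodup_ofList _) (PySem.Set.nodup_ofList _)]
    intro a
    simp [PySem.Set.mem_ofList, h.mem_iff]
  exact (hp.map (pvG P)).sum_eq

-- ===== VERDICT (by name: the statement is the Claim_ definition above) =====
theorem count_zero_sum_prefix_sum_spec : Claim_equal_count_zero_sum_prefix_sum := by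
  intro nums _
  unfold Spec_count_zero_sum_prefix_sum count_zero_sum_prefix_sum_alt
  rw [pv_loopB]
  have hP : ([(0 : Int)] ++ pvPsums 0 nums) = 0 :: pvPsums 0 nums := by simp
  rw [hP]
  have hpw : (PySem.List.sorted (0 :: pvPsums 0 nums) (fun x => x) false).Pairwise (· ≤ ·) := by
    simpa using PySem.List.sorted_pairwise (0 :: pvPsums 0 nums) (fun x => x)
  have hperm := PySem.List.sorted_perm (0 :: pvPsums 0 nums) (fun x => x) false
  rw [pv_A_eq, pv_run_eq _ _ (Nat.le_refl _) hpw, pv_sum_perm hperm]
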